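-- pv_equiv track=rewrite | github.com/vijay-guttula/DSAA | W3/Assignment/3-4ad.py | ad
-- ===== SOURCE A (Python) =====
-- def ad(n, a, b) :
--     i, sum = 0, 0
--     if n == 1:
--         return a[0] * b[0]
--     else :
--         while i < n :
--             j, k = a.index(min(a)), b.index(min(b))
--             sum += (min(a) * min(b))
--             del a[j]
--             del b[k]
--             i += 1
--         return sum
-- ===== SOURCE B (Python) =====
-- def ad(n, a, b):
--     if n == 1:
--         # A defines the n == 1 case directly as a[0] * b[0]; keep that case
--         return a[0] * b[0]
--     sa = sorted(a)
--     sb = sorted(b)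
--     total = 0
--     for i in range(n):
--         total += sa[i] * sb[i]
--     return total
-- ===== Notes on version B (the rewrite author's own statement) =====
-- stated objective: faster
-- what changed: Replaces the O(n^2) repeated min/index/delete loop (which also mutates a and b) with sorting both lists once and summing the first n pairwise products; A's explicit n == 1 case (a[0]*b[0]) is kept as is.
import Mathlib
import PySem

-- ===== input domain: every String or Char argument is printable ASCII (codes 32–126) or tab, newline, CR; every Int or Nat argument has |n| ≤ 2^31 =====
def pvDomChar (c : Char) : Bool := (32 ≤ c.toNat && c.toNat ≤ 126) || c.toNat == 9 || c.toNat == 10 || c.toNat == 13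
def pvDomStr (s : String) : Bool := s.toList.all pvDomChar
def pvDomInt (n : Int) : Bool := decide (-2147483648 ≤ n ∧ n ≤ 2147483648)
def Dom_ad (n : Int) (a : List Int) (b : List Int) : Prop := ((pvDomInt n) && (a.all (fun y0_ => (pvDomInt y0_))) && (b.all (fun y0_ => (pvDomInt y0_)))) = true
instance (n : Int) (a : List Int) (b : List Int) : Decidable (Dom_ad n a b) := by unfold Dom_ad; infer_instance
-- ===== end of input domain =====

-- B keeps A's explicit n == 1 case and otherwise sorts both lists once and sums
-- the first n pairwise products instead of A's repeated min/index/delete scan;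
-- A mutates a and b in place, B does not — the equivalence proved here is about
-- the return value only.

-- ===== PORT A =====
-- the while loop of A: each round takes min(a), min(b), deletes their first
-- occurrences (del a[j] / del b[k] with j,k from .index) and accumulates the product
def adLoop : Nat → List Int → List Int → Int → Int
  | 0, _, _, s => s
  | m + 1, a, b, s =>
    let ma := (PySem.List.min? a (fun x => x)).getD 0
    let mb := (PySem.List.min? b (fun x => x)).getD 0
    let j := (PySem.List.index? a ma).getD 0
    let k := (PySem.List.index? b mb).getD 0
    adLoop m (a.eraseIdx j) (b.eraseIdx k) (s + ma * mb)

def ad (n : Int) (a : List Int) (b : List Int) : Int :=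
  if n = 1 then
    ((PySem.List.pyGet? a 0).getD 0) * ((PySem.List.pyGet? b 0).getD 0)
  else
    adLoop n.toNat a b 0

-- ===== PORT B =====
def ad_alt (n : Int) (a : List Int) (b : List Int) : Int :=
  if n = 1 then
    ((PySem.List.pyGet? a 0).getD 0) * ((PySem.List.pyGet? b 0).getD 0)
  else
  let sa := PySem.List.sorted a (fun x => x) false
  let sb := PySem.List.sorted b (fun x => x) false
  (PySem.List.pyRange 0 n 1).foldl
    (fun t i => t + ((PySem.List.pyGet? sa i).getD 0) * ((PySem.List.pyGet? sb i).getD 0)) 0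

-- ===== PRECONDITION & SPEC =====
-- Pre_ excludes exactly the inputs where A raises: n = 1 with an empty list
-- (IndexError on a[0]/b[0]), and otherwise n greater than a list's length
-- (ValueError: min() of an empty list inside the loop).
def Pre_ad (n : Int) (a : List Int) (b : List Int) : Prop :=
  if n = 1 then a ≠ [] ∧ b ≠ [] else n ≤ a.length ∧ n ≤ b.length
instance (n : Int) (a : List Int) (b : List Int) : Decidable (Pre_ad n a b) := by
  unfold Pre_ad; infer_instance

def pvWitness_ad : Int × List Int × List Int := (2, [3, 1, 2], [5, 4])

def Spec_ad (n : Int) (a : List Int) (b : List Int) (out : Int) : Prop :=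
  out = ad_alt n a b
instance (n : Int) (a : List Int) (b : List Int) (out : Int) : Decidable (Spec_ad n a b out) := by
  unfold Spec_ad; infer_instance

-- ===== CLAIM (what is proved, stated in full; the proofs are below) =====
def Claim_equal_ad : Prop := ∀ (n : Int) (a : List Int) (b : List Int), Dom_ad n a b → Pre_ad n a b → Spec_ad n a b (ad n a b)

-- ===== LEMMAS AND PROOFS =====

-- sum of the first m pairwise products of two lists
def pairSum : Nat → List Int → List Int → Int
  | 0, _, _ => 0
  | m + 1, x :: xs, y :: ys => x * y + pairSum m xs ys
  | _ + 1, _, _ => 0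

-- sorted a = min(a) :: sorted (a with the first occurrence of min(a) removed)
theorem sorted_min_cons (a : List Int) (ha : a ≠ []) :
    PySem.List.sorted a (fun x => x) false =
      ((PySem.List.min? a (fun x => x)).getD 0) ::
        PySem.List.sorted
          (a.eraseIdx ((PySem.List.index? a ((PySem.List.min? a (fun x => x)).getD 0)).getD 0))
          (fun x => x) false := by
  obtain ⟨m, hm⟩ : ∃ m, PySem.List.min? a (fun x => x) = some m := by
    cases h : PySem.List.min? a (fun x => x) with
    | none => exact absurd ((PySem.List.min?_eq_none_iff a _).mp h) ha
    | some m => exact ⟨m, rfl⟩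
  have hmem : m ∈ a := PySem.List.min?_mem hm
  have hmin : ∀ y ∈ a, m ≤ y := PySem.List.min?_isMin hm
  rw [hm]
  simp only [Option.getD_some]
  obtain ⟨k, hk⟩ : ∃ k, PySem.List.index? a m = some k :=
    Option.isSome_iff_exists.mp ((PySem.List.index?_isSome_iff a m).mpr hmem)
  rw [hk]
  simp only [Option.getD_some]
  have herase : a.eraseIdx k = a.erase m := by
    rw [List.erase_eq_eraseIdx]
    rw [PySem.List.index?_eq_idxOf?] at hk
    rw [hk]
  rw [herase]
  apply PySem.List.sorted_id_eq_of_perm_of_pairwise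
  · exact ((List.perm_cons_erase hmem).trans
      (List.Perm.cons m (PySem.List.sorted_perm _ _ _).symm)).symm
  · rw [List.pairwise_cons]
    refine ⟨fun y hy => hmin y (List.erase_subset ((PySem.List.mem_sorted _ _ _ _).mp hy)), ?_⟩
    exact PySem.List.sorted_pairwise _ _

-- A's loop sums the same products as the sorted pairing over the first `fuel` positions
theorem adLoop_eq (fuel : Nat) : ∀ (a b : List Int) (s : Int),
    fuel ≤ a.length → fuel ≤ b.length →
    adLoop fuel a b s =
      s + pairSum fuel (PySem.List.sorted a (fun x => x) false)
                       (PySem.List.sorted b (fun x => x) false) := by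
  induction fuel with
  | zero => intro a b s _ _; simp [adLoop, pairSum]
  | succ m ih =>
    intro a b s h1 h2
    have ha : a ≠ [] := by intro h; subst h; simp at h1
    have hb : b ≠ [] := by intro h; subst h; simp at h2
    have hsa := sorted_min_cons a ha
    have hsb := sorted_min_cons b hb
    set a' := a.eraseIdx ((PySem.List.index? a ((PySem.List.min? a (fun x => x)).getD 0)).getD 0) with ha'
    set b' := b.eraseIdx ((PySem.List.index? b ((PySem.List.min? b (fun x => x)).getD 0)).getD 0) with hb'
    have hla : a'.length + 1 = a.length := by
      have := PySem.List.length_sorted a (fun x => x) false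
      rw [hsa] at this
      simpa [PySem.List.length_sorted] using this
    have hlb : b'.length + 1 = b.length := by
      have := PySem.List.length_sorted b (fun x => x) false
      rw [hsb] at this
      simpa [PySem.List.length_sorted] using this
    rw [hsa, hsb]
    show adLoop (m + 1) a b s = _
    simp only [adLoop]
    rw [ih a' b' _ (by omega) (by omega)]
    simp only [pairSum]
    ring

-- appending one more index to the pair sum
theorem pairSum_succ (m : Nat) : ∀ (sa sb : List Int), m < sa.length → m < sb.length →
    pairSum (m + 1) sa sb =
      pairSum m sa sb + sa.getD m 0 * sb.getD m 0 := by
  induction m with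
  | zero =>
    intro sa sb h1 h2
    match sa, sb with
    | x :: xs, y :: ys => simp [pairSum]
  | succ m ih =>
    intro sa sb h1 h2
    match sa, sb with
    | x :: xs, y :: ys =>
      show x * y + pairSum (m + 1) xs ys = x * y + pairSum m xs ys + _
      rw [ih xs ys (by simpa using h1) (by simpa using h2)]
      rw [List.getD_cons_succ, List.getD_cons_succ]
      ring

-- B's fold over range(m) is the pair sum of the first m positions
theorem foldB (m : Nat) (sa sb : List Int) (hm1 : m ≤ sa.length) (hm2 : m ≤ sb.length) :
    (PySem.List.pyRange 0 (m : Int) 1).foldl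
      (fun t i => t + ((PySem.List.pyGet? sa i).getD 0) * ((PySem.List.pyGet? sb i).getD 0)) 0 =
    pairSum m sa sb := by
  induction m with
  | zero => simp [PySem.List.pyRange_one_eq_nil, pairSum]
  | succ m ih =>
    have hcast : ((m + 1 : Nat) : Int) = (m : Int) + 1 := by push_cast; ring
    rw [hcast, PySem.List.pyRange_one_succ_right (by positivity), List.foldl_append]
    rw [ih (by omega) (by omega)]
    simp only [List.foldl_cons, List.foldl_nil]
    rw [pairSum_succ m sa sb (by omega) (by omega)]
    rw [PySem.List.pyGet?_natCast, PySem.List.pyGet?_natCast,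
        List.getD_eq_getElem?_getD, List.getD_eq_getElem?_getD]

-- ===== VERDICT (by name: the statement is the Claim_ definition above) =====
theorem ad_spec : Claim_equal_ad := by
  intro n a b _ hpre
  unfold Spec_ad ad ad_alt
  by_cases hn : n = 1
  · rw [if_pos hn, if_pos hn]
  · rw [if_neg hn, if_neg hn]
    simp only [Pre_ad, if_neg hn] at hpre
    obtain ⟨h1, h2⟩ := hpre
    have hta : n.toNat ≤ a.length := by omega
    have htb : n.toNat ≤ b.length := by omega
    rw [adLoop_eq n.toNat a b 0 hta htb]
    by_cases hpos : 0 < n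
    · have hcast : n = ((n.toNat : Nat) : Int) := by omega
      rw [hcast]
      rw [foldB n.toNat _ _ (by rw [PySem.List.length_sorted]; exact hta)
        (by rw [PySem.List.length_sorted]; exact htb)]
      rw [Int.toNat_natCast]
      ring
    · have h0 : n.toNat = 0 := by omega
      rw [h0, PySem.List.pyRange_one_eq_nil (by omega)]
      simp [pairSum]
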